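-- pv_equiv track=rewrite | github.com/JainLabWUSM/lightsheetsubmission | measuring_data/nerve_densities_5x.py | trim_list
-- ===== SOURCE A (Python) =====
-- def trim_list(my_list):
--     return_list = []
--     i = 0
--     while i < len(my_list):
--         new_number = 0
--         for k in range(min(5, len(my_list) - i)):
--             new_number += my_list[i]
--             i += 1
--         return_list.append(new_number)
--     return return_list
-- ===== SOURCE B (Python) =====
-- def trim_list(my_list):
--     return [sum(my_list[i:i+5]) for i in range(0, len(my_list), 5)]
-- ===== Notes on version B (the rewrite author's own statement) =====
-- stated objective: simpler
-- what changed: Replaces A's while-loop with a nested index-advancing accumulator loop by a single stride-5 comprehension that slices each chunk and reduces it with sum().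
import Mathlib
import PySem

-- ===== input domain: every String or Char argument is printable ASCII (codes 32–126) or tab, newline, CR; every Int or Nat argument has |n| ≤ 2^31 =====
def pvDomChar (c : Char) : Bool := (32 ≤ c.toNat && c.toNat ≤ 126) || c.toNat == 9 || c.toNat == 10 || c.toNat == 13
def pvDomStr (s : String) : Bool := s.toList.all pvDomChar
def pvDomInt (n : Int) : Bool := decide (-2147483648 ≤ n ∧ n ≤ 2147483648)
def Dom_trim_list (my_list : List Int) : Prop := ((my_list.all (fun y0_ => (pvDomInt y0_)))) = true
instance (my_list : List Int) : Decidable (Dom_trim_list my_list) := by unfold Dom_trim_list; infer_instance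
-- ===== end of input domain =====

-- B replaces A's while-loop with a nested index-advancing accumulator loop by a single
-- stride-5 comprehension that sums each 5-element slice; objective: simpler.


-- ===== PORT A =====
-- inner 'for k in range(min(5, len(my_list) - i))' loop: state (new_number, i)
-- (i only ever ranges over 0..len, so it is kept as a Nat; 'min 5 (len - i)' computed in Nat
-- equals Python's Int min here since both operands are nonnegative; my_list[i] is always
-- in range inside the loop, ported as getD with default 0)
def trim_list_inner (xs : List Int) (i : Nat) : Int × Nat :=
  (PySem.List.pyRange 0 ((min 5 (xs.length - i) : Nat) : Int) 1).foldl
    (fun (st : Int × Nat) _ => (st.1 + xs.getD st.2 0, st.2 + 1)) (0, i)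

-- the inner loop advances i by exactly the number of iterations (needed for termination)


-- the outer 'while i < len(my_list)' loop
-- the inner loop advances i by exactly the number of iterations (needed for termination)
lemma trim_list_inner_foldl (xs : List Int) (l : List Int) (a : Int) (i : Nat) :
    l.foldl (fun (st : Int × Nat) _ => (st.1 + xs.getD st.2 0, st.2 + 1)) (a, i)
      = (a + ((xs.drop i).take l.length).sum, i + l.length) := by
  induction l generalizing a i with
  | nil => simp
  | cons x l ih =>
    rw [List.foldl_cons, ih]
    by_cases h : i < xs.length
    · rw [List.drop_eq_getElem_cons h]
      simp only [List.length_cons, List.take_succ_cons, List.sum_cons, List.getD,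
        List.getElem?_eq_getElem h, Option.getD_some, Prod.mk.injEq]
      exact ⟨by ring, by omega⟩
    · have d1 : xs.drop i = [] := List.drop_eq_nil_of_le (by omega)
      have d2 : xs.drop (i + 1) = [] := List.drop_eq_nil_of_le (by omega)
      rw [d1, d2]
      simp only [List.length_cons, List.take_nil, List.sum_nil, List.getD,
        List.getElem?_eq_none (l := xs) (by omega : xs.length ≤ i), Option.getD_none,
        Prod.mk.injEq]
      exact ⟨by ring, by omega⟩

lemma trim_list_inner_eq (xs : List Int) (i : Nat) :
    trim_list_inner xs i
      = (((xs.drop i).take (min 5 (xs.length - i))).sum, i + min 5 (xs.length - i)) := by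
  unfold trim_list_inner
  rw [trim_list_inner_foldl, PySem.List.length_pyRange_one]
  have h : ((((min 5 (xs.length - i) : Nat) : Int)) - 0).toNat = min 5 (xs.length - i) := by
    omega
  rw [h, zero_add]

-- the outer 'while i < len(my_list)' loop
def trim_list_go (xs : List Int) (ret : List Int) (i : Nat) : List Int :=
  if _h : i < xs.length then
    trim_list_go xs (ret ++ [(trim_list_inner xs i).1]) (trim_list_inner xs i).2
  else ret
termination_by xs.length - i
decreasing_by
  rw [trim_list_inner_eq]
  simp only
  omega

def trim_list (my_list : List Int) : List Int :=
  trim_list_go my_list [] 0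

-- ===== PORT B =====
def trim_list_alt (my_list : List Int) : List Int :=
  (PySem.List.pyRange 0 (my_list.length : Int) 5).map
    (fun i => (PySem.List.slice my_list (some i) (some (i + 5))).sum)

-- ===== PRECONDITION & SPEC =====
def Spec_trim_list (my_list : List Int) (out : List Int) : Prop := out = trim_list_alt my_list
instance (my_list : List Int) (out : List Int) : Decidable (Spec_trim_list my_list out) := by unfold Spec_trim_list; infer_instance

-- ===== CLAIM (what is proved, stated in full; the proofs are below) =====
def Claim_equal_trim_list : Prop := ∀ (my_list : List Int), Dom_trim_list my_list → Spec_trim_list my_list (trim_list my_list)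

-- ===== LEMMAS AND PROOFS =====

lemma pyRange5_nil (a b : Int) (h : b ≤ a) : PySem.List.pyRange a b 5 = [] := by
  rw [PySem.List.pyRange_of_pos a b (by norm_num)]
  simp [not_lt.mpr h]

lemma pyRange5_cons (a b : Int) (h : a < b) :
    PySem.List.pyRange a b 5 = a :: PySem.List.pyRange (a + 5) b 5 := by
  rw [PySem.List.pyRange_of_pos a b (by norm_num),
      PySem.List.pyRange_of_pos (a + 5) b (by norm_num)]
  have hn : (if a < b then ((b - a + 5 - 1) / 5).toNat else 0)
      = (if a + 5 < b then ((b - (a + 5) + 5 - 1) / 5).toNat else 0) + 1 := by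
    split_ifs <;> omega
  rw [hn, List.range_succ_eq_map]
  simp only [List.map_cons, List.map_map]
  congr 1
  · norm_num
  · apply List.map_congr_left
    intro k _
    simp only [Function.comp_apply]
    push_cast
    ring

lemma trim_list_go_eq (fuel : Nat) (xs : List Int) : ∀ (i : Nat) (ret : List Int),
    xs.length ≤ i + fuel →
    trim_list_go xs ret i
      = ret ++ (PySem.List.pyRange (i : Int) (xs.length : Int) 5).map
          (fun j => (PySem.List.slice xs (some j) (some (j + 5))).sum) := by
  induction fuel with
  | zero =>
    intro i ret h
    rw [trim_list_go, dif_neg (by omega), pyRange5_nil _ _ (by exact_mod_cast h)]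
    simp
  | succ fuel ih =>
    intro i ret h
    by_cases hi : i < xs.length
    · rw [trim_list_go, dif_pos hi, trim_list_inner_eq,
        pyRange5_cons (i : Int) (xs.length : Int) (by exact_mod_cast hi),
        ih (i + min 5 (xs.length - i)) _ (by omega)]
      simp only [List.map_cons, List.append_assoc, List.singleton_append]
      congr 2
      · -- heads: take (min 5 (len-i)) sum = slice sum
        have hs : PySem.List.slice xs (some (i : Int)) (some ((i : Int) + ((5 : Nat) : Int)))
            = (xs.drop i).take 5 := PySem.List.slice_natCast_add xs i 5
        push_cast at hs
        rw [hs]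
        have hl : (xs.drop i).length = xs.length - i := List.length_drop
        by_cases h5 : 5 ≤ xs.length - i
        · rw [show min 5 (xs.length - i) = 5 from by omega]
        · rw [show min 5 (xs.length - i) = xs.length - i from by omega, ← hl,
            List.take_length, List.take_of_length_le (by omega)]
      · -- tails
        by_cases h5 : i + 5 ≤ xs.length
        · rw [show i + min 5 (xs.length - i) = i + 5 from by omega]
          norm_cast
        · rw [show i + min 5 (xs.length - i) = xs.length from by omega,
            pyRange5_nil _ _ (le_refl _), pyRange5_nil _ _ (by omega)]
    · rw [trim_list_go, dif_neg hi, pyRange5_nil _ _ (by exact_mod_cast Nat.le_of_not_lt hi)]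
      simp

-- ===== VERDICT (by name: the statement is the Claim_ definition above) =====
theorem trim_list_spec : Claim_equal_trim_list := by
  intro xs _
  unfold Spec_trim_list trim_list trim_list_alt
  exact trim_list_go_eq xs.length xs 0 [] (by omega)
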